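-- pv_equiv track=rewrite | github.com/jwong6100/CompSciHW | HW5/poker_hand_work.py | longest_suit
-- ===== SOURCE A (Python) =====
-- def longest_suit(hand):
--     '''Returns the longest subset of a hand in the same suit
--     Five cards in one suit counts as a Flush'''
--     suit_sets = [[],[],[],[]]      # four empty lists
--
--     #going through cards in hand and adding them to list array.
--     for card in hand:
--         if card[1] == 1:
--             suit_sets[0].append(card)
--         elif card[1] == 2:
--             suit_sets[1].append(card)
--         elif card[1] == 3:
--             suit_sets[2].append(card)
--         elif card[1] == 4:
--             suit_sets[3].append(card)
--
--     #determining longest suit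
--     while (len(suit_sets) > 1):
--         if len(suit_sets[0]) >= len(suit_sets[1]):
--             del suit_sets[1]
--         else:
--             del suit_sets[0]
--
--     answer = suit_sets[0]
--
--     return answer
-- ===== SOURCE B (Python) =====
-- def longest_suit(hand):
--     '''Returns the longest subset of a hand in the same suit
--     Five cards in one suit counts as a Flush'''
--     counts = [0, 0, 0, 0]
--     for card in hand:
--         if card[1] in (1, 2, 3, 4):
--             counts[card[1] - 1] += 1
--     best = counts.index(max(counts))
--     return [card for card in hand if card[1] == best + 1]
-- ===== Notes on version B (the rewrite author's own statement) =====
-- stated objective: simpler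
-- what changed: Replaced A's four accumulator lists and pairwise while-deletion with a single 4-slot count array, a max/index pick of the best suit (first max = A's lowest-suit tie-break), and one filtering comprehension over the hand.
import Mathlib
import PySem

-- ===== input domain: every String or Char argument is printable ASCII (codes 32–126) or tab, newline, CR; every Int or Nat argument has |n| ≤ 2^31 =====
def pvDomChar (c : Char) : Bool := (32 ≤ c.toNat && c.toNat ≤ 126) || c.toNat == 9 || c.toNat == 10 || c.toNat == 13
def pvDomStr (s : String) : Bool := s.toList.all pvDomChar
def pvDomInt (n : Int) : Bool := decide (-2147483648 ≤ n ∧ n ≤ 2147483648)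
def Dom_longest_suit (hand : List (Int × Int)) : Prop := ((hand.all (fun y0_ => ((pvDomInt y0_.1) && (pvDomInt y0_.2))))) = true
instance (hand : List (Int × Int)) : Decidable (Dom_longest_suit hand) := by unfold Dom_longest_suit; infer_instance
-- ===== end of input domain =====

-- B replaces A's four accumulator lists and pairwise while-deletion by a suit-count
-- array, a max/index pick of the best suit, and one filtering pass (simpler decomposition).


-- ===== PORT A =====
-- the while-loop: while len(suit_sets) > 1: keep suit_sets[0] if its length ≥ suit_sets[1]'s, else delete suit_sets[0]
def lsLoop (s : List (List (Int × Int))) : List (List (Int × Int)) :=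
  match s with
  | a :: b :: rest =>
    if a.length ≥ b.length then lsLoop (a :: rest) else lsLoop (b :: rest)
  | s => s
termination_by s.length

-- the for-loop state is the four suit_sets lists (always exactly four, indexed by constants in A)
def lsStep (s : List (Int × Int) × List (Int × Int) × List (Int × Int) × List (Int × Int))
    (card : Int × Int) :
    List (Int × Int) × List (Int × Int) × List (Int × Int) × List (Int × Int) :=
  if card.2 = 1 then (s.1 ++ [card], s.2.1, s.2.2.1, s.2.2.2)
  else if card.2 = 2 then (s.1, s.2.1 ++ [card], s.2.2.1, s.2.2.2)
  else if card.2 = 3 then (s.1, s.2.1, s.2.2.1 ++ [card], s.2.2.2)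
  else if card.2 = 4 then (s.1, s.2.1, s.2.2.1, s.2.2.2 ++ [card])
  else s

def longest_suit (hand : List (Int × Int)) : List (Int × Int) :=
  let s := hand.foldl lsStep ([], [], [], [])
  -- answer = suit_sets[0]; the loop always leaves exactly one list, headD's default is never used
  (lsLoop [s.1, s.2.1, s.2.2.1, s.2.2.2]).headD []

-- ===== PORT B =====
-- counts[card[1]-1] += 1 when card[1] in (1,2,3,4); the guard keeps (card.2 - 1).toNat exact (index is 0..3)
def lsCount (c : List Int) (card : Int × Int) : List Int :=
  if card.2 = 1 ∨ card.2 = 2 ∨ card.2 = 3 ∨ card.2 = 4 then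
    c.set (card.2 - 1).toNat ((c.getD (card.2 - 1).toNat 0) + 1)
  else c

def longest_suit_alt (hand : List (Int × Int)) : List (Int × Int) :=
  let counts := hand.foldl lsCount [0, 0, 0, 0]
  -- best = counts.index(max(counts)); counts is nonempty so max?/index? are some, getD's defaults are never used
  let m := (PySem.List.max? counts (fun x => x)).getD 0
  let best : Nat := (PySem.List.index? counts m).getD 0
  hand.filter (fun card => card.2 == (best : Int) + 1)

-- ===== PRECONDITION & SPEC =====
def Spec_longest_suit (hand : List (Int × Int)) (out : List (Int × Int)) : Prop := out = longest_suit_alt hand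
instance (hand : List (Int × Int)) (out : List (Int × Int)) : Decidable (Spec_longest_suit hand out) := by unfold Spec_longest_suit; infer_instance

-- ===== CLAIM (what is proved, stated in full; the proofs are below) =====
def Claim_equal_longest_suit : Prop := ∀ (hand : List (Int × Int)), Dom_longest_suit hand → Spec_longest_suit hand (longest_suit hand)

-- ===== LEMMAS AND PROOFS =====

-- A's fold builds the four suit buckets: each component is a filter of the hand
theorem lsFold_eq (hand : List (Int × Int))
    (s : List (Int × Int) × List (Int × Int) × List (Int × Int) × List (Int × Int)) :
    hand.foldl lsStep s =
      (s.1 ++ hand.filter (fun c => c.2 == 1),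
       s.2.1 ++ hand.filter (fun c => c.2 == 2),
       s.2.2.1 ++ hand.filter (fun c => c.2 == 3),
       s.2.2.2 ++ hand.filter (fun c => c.2 == 4)) := by
  induction hand generalizing s with
  | nil => simp
  | cons a t ih =>
    simp only [List.foldl_cons, List.filter_cons, ih, lsStep]
    by_cases h1 : a.2 = 1 <;> by_cases h2 : a.2 = 2 <;> by_cases h3 : a.2 = 3 <;>
      by_cases h4 : a.2 = 4 <;> simp_all

-- B's fold counts the four suits
theorem lsCountFold_eq (hand : List (Int × Int)) (c1 c2 c3 c4 : Int) :
    hand.foldl lsCount [c1, c2, c3, c4] =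
      [c1 + (hand.filter (fun c => c.2 == 1)).length,
       c2 + (hand.filter (fun c => c.2 == 2)).length,
       c3 + (hand.filter (fun c => c.2 == 3)).length,
       c4 + (hand.filter (fun c => c.2 == 4)).length] := by
  induction hand generalizing c1 c2 c3 c4 with
  | nil => simp
  | cons a t ih =>
    simp only [List.foldl_cons, List.filter_cons, lsCount]
    by_cases h1 : a.2 = 1 <;> by_cases h2 : a.2 = 2 <;> by_cases h3 : a.2 = 3 <;>
      by_cases h4 : a.2 = 4 <;>
      simp_all [List.set] <;> omega

theorem lsLoop_single (f : List (Int × Int)) : lsLoop [f] = [f] := by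
  unfold lsLoop; rfl

theorem longest_suit_spec_aux (hand : List (Int × Int)) :
    longest_suit hand = longest_suit_alt hand := by
  unfold longest_suit longest_suit_alt
  rw [lsFold_eq, lsCountFold_eq]
  simp only [List.nil_append, zero_add]
  set f1 := hand.filter (fun c => c.2 == 1) with hf1
  set f2 := hand.filter (fun c => c.2 == 2) with hf2
  set f3 := hand.filter (fun c => c.2 == 3) with hf3
  set f4 := hand.filter (fun c => c.2 == 4) with hf4
  rw [PySem.List.max?_id_cons]
  simp only [List.foldl_cons, List.foldl_nil, Option.getD_some]
  by_cases h12 : f1.length ≥ f2.length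
  · by_cases h13 : f1.length ≥ f3.length
    · by_cases h14 : f1.length ≥ f4.length
      · -- winner f1
        have hm : max (max (max (f1.length : Int) f2.length) f3.length) f4.length = (f1.length : Int) := by omega
        rw [hm, PySem.List.index?_cons_self]
        simp only [Option.getD_some, Nat.cast_zero, zero_add]
        rw [lsLoop, if_pos h12, lsLoop, if_pos h13, lsLoop, if_pos h14, lsLoop_single]
        simp [hf1]
      · -- winner f4
        have hm : max (max (max (f1.length : Int) f2.length) f3.length) f4.length = (f4.length : Int) := by omega
        have e1 : ((f1.length : Int)) ≠ (f4.length : Int) := by omega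
        have e2 : ((f2.length : Int)) ≠ (f4.length : Int) := by omega
        have e3 : ((f3.length : Int)) ≠ (f4.length : Int) := by omega
        rw [hm, PySem.List.index?_cons_of_ne _ e1, PySem.List.index?_cons_of_ne _ e2,
            PySem.List.index?_cons_of_ne _ e3, PySem.List.index?_cons_self]
        simp only [Option.map_some, Option.getD_some]
        rw [lsLoop, if_pos h12, lsLoop, if_pos h13, lsLoop, if_neg h14, lsLoop_single]
        simp [hf4]
    · by_cases h34 : f3.length ≥ f4.length
      · -- winner f3
        have hm : max (max (max (f1.length : Int) f2.length) f3.length) f4.length = (f3.length : Int) := by omega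
        have e1 : ((f1.length : Int)) ≠ (f3.length : Int) := by omega
        have e2 : ((f2.length : Int)) ≠ (f3.length : Int) := by omega
        rw [hm, PySem.List.index?_cons_of_ne _ e1, PySem.List.index?_cons_of_ne _ e2,
            PySem.List.index?_cons_self]
        simp only [Option.map_some, Option.getD_some]
        rw [lsLoop, if_pos h12, lsLoop, if_neg h13, lsLoop, if_pos h34, lsLoop_single]
        simp [hf3]
      · -- winner f4
        have hm : max (max (max (f1.length : Int) f2.length) f3.length) f4.length = (f4.length : Int) := by omega
        have e1 : ((f1.length : Int)) ≠ (f4.length : Int) := by omega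
        have e2 : ((f2.length : Int)) ≠ (f4.length : Int) := by omega
        have e3 : ((f3.length : Int)) ≠ (f4.length : Int) := by omega
        rw [hm, PySem.List.index?_cons_of_ne _ e1, PySem.List.index?_cons_of_ne _ e2,
            PySem.List.index?_cons_of_ne _ e3, PySem.List.index?_cons_self]
        simp only [Option.map_some, Option.getD_some]
        rw [lsLoop, if_pos h12, lsLoop, if_neg h13, lsLoop, if_neg h34, lsLoop_single]
        simp [hf4]
  · by_cases h23 : f2.length ≥ f3.length
    · by_cases h24 : f2.length ≥ f4.length
      · -- winner f2
        have hm : max (max (max (f1.length : Int) f2.length) f3.length) f4.length = (f2.length : Int) := by omega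
        have e1 : ((f1.length : Int)) ≠ (f2.length : Int) := by omega
        rw [hm, PySem.List.index?_cons_of_ne _ e1, PySem.List.index?_cons_self]
        simp only [Option.map_some, Option.getD_some]
        rw [lsLoop, if_neg h12, lsLoop, if_pos h23, lsLoop, if_pos h24, lsLoop_single]
        simp [hf2]
      · -- winner f4
        have hm : max (max (max (f1.length : Int) f2.length) f3.length) f4.length = (f4.length : Int) := by omega
        have e1 : ((f1.length : Int)) ≠ (f4.length : Int) := by omega
        have e2 : ((f2.length : Int)) ≠ (f4.length : Int) := by omega
        have e3 : ((f3.length : Int)) ≠ (f4.length : Int) := by omega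
        rw [hm, PySem.List.index?_cons_of_ne _ e1, PySem.List.index?_cons_of_ne _ e2,
            PySem.List.index?_cons_of_ne _ e3, PySem.List.index?_cons_self]
        simp only [Option.map_some, Option.getD_some]
        rw [lsLoop, if_neg h12, lsLoop, if_pos h23, lsLoop, if_neg h24, lsLoop_single]
        simp [hf4]
    · by_cases h34 : f3.length ≥ f4.length
      · -- winner f3
        have hm : max (max (max (f1.length : Int) f2.length) f3.length) f4.length = (f3.length : Int) := by omega
        have e1 : ((f1.length : Int)) ≠ (f3.length : Int) := by omega
        have e2 : ((f2.length : Int)) ≠ (f3.length : Int) := by omega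
        rw [hm, PySem.List.index?_cons_of_ne _ e1, PySem.List.index?_cons_of_ne _ e2,
            PySem.List.index?_cons_self]
        simp only [Option.map_some, Option.getD_some]
        rw [lsLoop, if_neg h12, lsLoop, if_neg h23, lsLoop, if_pos h34, lsLoop_single]
        simp [hf3]
      · -- winner f4
        have hm : max (max (max (f1.length : Int) f2.length) f3.length) f4.length = (f4.length : Int) := by omega
        have e1 : ((f1.length : Int)) ≠ (f4.length : Int) := by omega
        have e2 : ((f2.length : Int)) ≠ (f4.length : Int) := by omega
        have e3 : ((f3.length : Int)) ≠ (f4.length : Int) := by omega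
        rw [hm, PySem.List.index?_cons_of_ne _ e1, PySem.List.index?_cons_of_ne _ e2,
            PySem.List.index?_cons_of_ne _ e3, PySem.List.index?_cons_self]
        simp only [Option.map_some, Option.getD_some]
        rw [lsLoop, if_neg h12, lsLoop, if_neg h23, lsLoop, if_neg h34, lsLoop_single]
        simp [hf4]

-- ===== VERDICT (by name: the statement is the Claim_ definition above) =====
theorem longest_suit_spec : Claim_equal_longest_suit := by
  intro hand _
  exact longest_suit_spec_aux hand
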